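-- pv_equiv track=rewrite | github.com/radoslawrolka/Introduction_to_Computer_Science_Course | Zestaw_3/z21_d.py | trojki
-- ===== SOURCE A (Python) =====
-- def nwd(x, y):
--     while y > 0:
--         x, y = y, x % y
--     return x
--
-- def trojki(tab):
--     n = len(tab)
--     counter = 0
--     for i in range(n - 2):
--         if nwd(nwd(tab[i], tab[i + 1]), tab[i + 2]) == 1:
--             counter += 1
--     for i in range(n - 3):
--         if nwd(nwd(tab[i], tab[i + 1]), tab[i + 3]) == 1:
--             counter += 1
--         if nwd(nwd(tab[i], tab[i + 2]), tab[i + 3]) == 1: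
--             counter += 1
--     for i in range(n - 4):
--         if nwd(nwd(tab[i], tab[i + 2]), tab[i + 4]) == 1:
--             counter += 1
--     return counter
-- ===== SOURCE B (Python) =====
-- def nwd(x, y):
--     while y > 0:
--         x, y = y, x % y
--     return x
--
-- def trojki(tab):
--     # Single streaming pass: each element closes the triples whose LAST index it is,
--     # read from a sliding window of (up to) the four preceding elements.
--     counter = 0
--     w = []  # the up-to-4 elements immediately preceding the current one
--     for v in tab:
--         k = len(w)
--         if k >= 2 and nwd(nwd(w[k - 2], w[k - 1]), v) == 1:   # ends pattern (0,1,2)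
--             counter += 1
--         if k >= 3:
--             if nwd(nwd(w[k - 3], w[k - 2]), v) == 1:          # ends pattern (0,1,3)
--                 counter += 1
--             if nwd(nwd(w[k - 3], w[k - 1]), v) == 1:          # ends pattern (0,2,3)
--                 counter += 1
--         if k >= 4 and nwd(nwd(w[k - 4], w[k - 2]), v) == 1:   # ends pattern (0,2,4)
--             counter += 1
--         w.append(v)
--         if len(w) > 4:
--             w.pop(0)
--     return counter
-- ===== Notes on version B (the rewrite author's own statement) =====
-- stated objective: alternative
-- what changed: Replaces A's three staged index-range passes (triples anchored at their first index) by one streaming pass that keeps a sliding window of the four preceding elements and counts, at each element, the triples that END there - no index arithmetic into tab, makeshift deque state instead of range loops.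
import Mathlib
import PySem

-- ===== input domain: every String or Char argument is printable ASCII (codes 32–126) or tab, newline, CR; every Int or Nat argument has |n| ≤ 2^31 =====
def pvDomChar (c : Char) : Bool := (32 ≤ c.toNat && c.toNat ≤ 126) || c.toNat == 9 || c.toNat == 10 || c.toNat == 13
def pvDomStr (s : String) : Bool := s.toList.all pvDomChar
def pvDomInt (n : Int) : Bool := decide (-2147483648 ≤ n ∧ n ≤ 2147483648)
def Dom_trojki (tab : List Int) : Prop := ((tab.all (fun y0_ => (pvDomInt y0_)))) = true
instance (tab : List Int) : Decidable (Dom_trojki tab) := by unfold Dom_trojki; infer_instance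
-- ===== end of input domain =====

-- B replaces A's three staged index-range passes (triples anchored at their first index) by one
-- streaming pass over the list that keeps a sliding window of the four preceding elements and
-- counts, at each element, the triples that END there (objective: alternative, same cost).

-- ===== PORT A =====
-- shared helper `nwd` (identical in Source A and Source B): while y > 0: x, y = y, x % y
def nwd (x y : Int) : Int :=
  if h : 0 < y then nwd y (PySem.Int.mod x y) else x
termination_by y.toNat
decreasing_by
  have h1 := PySem.Int.mod_lt x h
  have h2 := PySem.Int.mod_nonneg x h
  omega

def trojki (tab : List Int) : Int :=
  let n : Int := PySem.List.len tab
  let c1 : Int := (PySem.List.pyRange 0 (n - 2)).foldl (fun counter i =>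
    if nwd (nwd (PySem.List.pyGetD tab i 0) (PySem.List.pyGetD tab (i + 1) 0))
           (PySem.List.pyGetD tab (i + 2) 0) = 1 then counter + 1 else counter) 0
  let c2 : Int := (PySem.List.pyRange 0 (n - 3)).foldl (fun counter i =>
    let counter := if nwd (nwd (PySem.List.pyGetD tab i 0) (PySem.List.pyGetD tab (i + 1) 0))
           (PySem.List.pyGetD tab (i + 3) 0) = 1 then counter + 1 else counter
    if nwd (nwd (PySem.List.pyGetD tab i 0) (PySem.List.pyGetD tab (i + 2) 0))
           (PySem.List.pyGetD tab (i + 3) 0) = 1 then counter + 1 else counter) c1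
  (PySem.List.pyRange 0 (n - 4)).foldl (fun counter i =>
    if nwd (nwd (PySem.List.pyGetD tab i 0) (PySem.List.pyGetD tab (i + 2) 0))
           (PySem.List.pyGetD tab (i + 4) 0) = 1 then counter + 1 else counter) c2

-- ===== PORT B =====
-- one pass over tab; state = (counter, window of up to 4 preceding elements);
-- `w.pop(0)` is ported as `.tail` (exact: the guard `len > 4` makes w nonempty there)
def trojki_alt (tab : List Int) : Int :=
  (tab.foldl (fun (st : Int × List Int) v =>
    let counter := st.1
    let w := st.2
    let k : Int := PySem.List.len w
    let counter := if 2 ≤ k ∧ nwd (nwd (PySem.List.pyGetD w (k - 2) 0) (PySem.List.pyGetD w (k - 1) 0)) v = 1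
      then counter + 1 else counter
    let counter := if 3 ≤ k then
        (let counter := if nwd (nwd (PySem.List.pyGetD w (k - 3) 0) (PySem.List.pyGetD w (k - 2) 0)) v = 1
           then counter + 1 else counter
         if nwd (nwd (PySem.List.pyGetD w (k - 3) 0) (PySem.List.pyGetD w (k - 1) 0)) v = 1
           then counter + 1 else counter)
      else counter
    let counter := if 4 ≤ k ∧ nwd (nwd (PySem.List.pyGetD w (k - 4) 0) (PySem.List.pyGetD w (k - 2) 0)) v = 1
      then counter + 1 else counter
    let w := w ++ [v]
    let w := if PySem.List.len w > 4 then w.tail else w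
    (counter, w)) ((0 : Int), ([] : List Int))).1

-- ===== PRECONDITION & SPEC =====
def Spec_trojki (tab : List Int) (out : Int) : Prop := out = trojki_alt tab
instance (tab : List Int) (out : Int) : Decidable (Spec_trojki tab out) := by unfold Spec_trojki; infer_instance

-- ===== CLAIM (what is proved, stated in full; the proofs are below) =====
def Claim_equal_trojki : Prop := ∀ (tab : List Int), Dom_trojki tab → Spec_trojki tab (trojki tab)

-- ===== LEMMAS AND PROOFS =====

-- 0/1 indicator used to flatten the guarded counting loops into sums
def pvInd (p : Prop) [Decidable p] : Int := if p then 1 else 0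

-- shorthand for tab[j] lookups and the four coprimality patterns, anchored at the FIRST index
abbrev pvG (tab : List Int) (i : Int) : Int := PySem.List.pyGetD tab i 0
abbrev pvP1 (tab : List Int) (i : Int) : Prop := nwd (nwd (pvG tab i) (pvG tab (i + 1))) (pvG tab (i + 2)) = 1
abbrev pvP2 (tab : List Int) (i : Int) : Prop := nwd (nwd (pvG tab i) (pvG tab (i + 1))) (pvG tab (i + 3)) = 1
abbrev pvP3 (tab : List Int) (i : Int) : Prop := nwd (nwd (pvG tab i) (pvG tab (i + 2))) (pvG tab (i + 3)) = 1
abbrev pvP4 (tab : List Int) (i : Int) : Prop := nwd (nwd (pvG tab i) (pvG tab (i + 2))) (pvG tab (i + 4)) = 1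

-- contribution of the element at index j (the triples ENDING at j), re-anchored at the first index
def pvContrib (tab : List Int) (j : Nat) : Int :=
  pvInd (2 ≤ (j : Int) ∧ pvP1 tab ((j : Int) - 2)) + pvInd (3 ≤ (j : Int) ∧ pvP2 tab ((j : Int) - 3))
    + pvInd (3 ≤ (j : Int) ∧ pvP3 tab ((j : Int) - 3)) + pvInd (4 ≤ (j : Int) ∧ pvP4 tab ((j : Int) - 4))

-- the fold body of trojki_alt, named for the induction
def pvBodyB : Int × List Int → Int → Int × List Int := fun st v =>
    let counter := st.1
    let w := st.2
    let k : Int := PySem.List.len w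
    let counter := if 2 ≤ k ∧ nwd (nwd (PySem.List.pyGetD w (k - 2) 0) (PySem.List.pyGetD w (k - 1) 0)) v = 1
      then counter + 1 else counter
    let counter := if 3 ≤ k then
        (let counter := if nwd (nwd (PySem.List.pyGetD w (k - 3) 0) (PySem.List.pyGetD w (k - 2) 0)) v = 1
           then counter + 1 else counter
         if nwd (nwd (PySem.List.pyGetD w (k - 3) 0) (PySem.List.pyGetD w (k - 1) 0)) v = 1
           then counter + 1 else counter)
      else counter
    let counter := if 4 ≤ k ∧ nwd (nwd (PySem.List.pyGetD w (k - 4) 0) (PySem.List.pyGetD w (k - 2) 0)) v = 1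
      then counter + 1 else counter
    let w := w ++ [v]
    let w := if PySem.List.len w > 4 then w.tail else w
    (counter, w)

theorem trojki_alt_eq (tab : List Int) :
    trojki_alt tab = (tab.foldl pvBodyB ((0 : Int), ([] : List Int))).1 := rfl

-- the window of (up to) the 4 elements preceding the current position
def pvWin (l : List Int) : List Int := l.drop (l.length - 4)

theorem pvWin_push (pre : List Int) (v : Int) :
    (if PySem.List.len (pvWin pre ++ [v]) > 4 then (pvWin pre ++ [v]).tail else pvWin pre ++ [v])
      = pvWin (pre ++ [v]) := by
  unfold pvWin
  by_cases h : 4 ≤ pre.length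
  · rw [if_pos (by simp; omega)]
    rw [← List.drop_one, List.drop_append_of_le_length (by simp; omega), List.drop_drop]
    rw [show (pre ++ [v]).length - 4 = pre.length - 4 + 1 by simp; omega,
        List.drop_append_of_le_length (by omega)]
  · rw [if_neg (by simp; omega)]
    rw [show pre.length - 4 = 0 by omega, show (pre ++ [v]).length - 4 = 0 by simp; omega]
    simp

theorem pvWin_get (pre : List Int) (d : Int) (h1 : 1 ≤ d) (hd : d ≤ 4) (h : d ≤ (pre.length : Int)) :
    PySem.List.pyGetD (pvWin pre) ((PySem.List.len (pvWin pre)) - d) 0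
      = PySem.List.pyGetD pre ((pre.length : Int) - d) 0 := by
  have hw : (pvWin pre).length = pre.length - (pre.length - 4) := by
    unfold pvWin; simp
  rw [PySem.List.pyGetD_eq_getElem _ 0 (by simp [hw]; omega) (by simp [hw]; omega),
      PySem.List.pyGetD_eq_getElem _ 0 (by omega) (by omega)]
  unfold pvWin
  rw [List.getElem_drop]
  congr 1
  have h5 : (List.drop (pre.length - 4) pre).length = pre.length - (pre.length - 4) := by simp
  simp only [PySem.List.len_eq, h5]
  omega

-- prefix lookups are stable under appending
theorem pvG_prefix (pre suf : List Int) (i : Int) (h0 : 0 ≤ i) (h : i < pre.length) :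
    pvG (pre ++ suf) i = PySem.List.pyGetD pre i 0 := by
  unfold pvG
  rw [PySem.List.pyGetD_eq_getElem _ 0 h0 (by simp; omega),
      PySem.List.pyGetD_eq_getElem _ 0 h0 (by omega)]
  exact List.getElem_append_left (by omega)

theorem pvG_at (pre rest : List Int) (v : Int) :
    pvG (pre ++ v :: rest) (pre.length : Int) = v := by
  unfold pvG
  rw [PySem.List.pyGetD_eq_getElem _ 0 (by omega) (by simp)]
  rw [List.getElem_append_right (by simp)]
  simp

theorem pvIte_two (h q2 q3 : Prop) [Decidable h] [Decidable q2] [Decidable q3] (c : Int) :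
    (if h then
        (let c' := if q2 then c + 1 else c
         if q3 then c' + 1 else c')
      else c) = c + pvInd (h ∧ q2) + pvInd (h ∧ q3) := by
  unfold pvInd
  by_cases h <;> by_cases q2 <;> by_cases q3 <;> simp [*]

theorem pvIte_succ (p : Prop) [Decidable p] (c : Int) :
    (if p then c + 1 else c) = c + pvInd p := by
  unfold pvInd; split_ifs <;> ring

theorem pvFoldl_ind {α : Type} (P : α → Prop) [DecidablePred P] (l : List α) (a : Int) :
    l.foldl (fun c x => if P x then c + 1 else c) a
      = a + (l.map (fun x => pvInd (P x))).sum := by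
  have h : (fun (c : Int) (x : α) => if P x then c + 1 else c)
      = fun c x => c + pvInd (P x) := by
    funext c x; exact pvIte_succ (P x) c
  rw [h, PySem.List.foldl_add]

theorem pvFoldl_ind2 (P Q : Int → Prop) [DecidablePred P] [DecidablePred Q] (l : List Int) (a : Int) :
    l.foldl (fun c i => if Q i then (if P i then c + 1 else c) + 1 else (if P i then c + 1 else c)) a
      = a + (l.map (fun i => pvInd (P i))).sum + (l.map (fun i => pvInd (Q i))).sum := by
  have h : (fun (c : Int) (i : Int) =>
      if Q i then (if P i then c + 1 else c) + 1 else (if P i then c + 1 else c))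
      = fun c i => c + (fun i => pvInd (P i) + pvInd (Q i)) i := by
    funext c i
    by_cases hq : Q i <;> by_cases hp : P i <;> simp [pvInd, hp, hq] <;> try ring
  rw [h, PySem.List.foldl_add, PySem.List.sum_map_add_int]
  ring

theorem pvRangeConv (P : Int → Prop) [DecidablePred P] (m : Int) :
    ((PySem.List.pyRange 0 m 1).map (fun i => pvInd (P i))).sum
      = ((List.range m.toNat).map (fun (t : Nat) => pvInd (P (t : Int)))).sum := by
  rw [PySem.List.pyRange_one, List.map_map]
  simp only [Int.sub_zero]
  apply congrArg
  apply List.map_congr_left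
  intro t _
  simp

-- window lookups seen through the whole list
theorem pvLook (pre rest : List Int) (v : Int) (d : Int) (h1 : 1 ≤ d) (hd : d ≤ 4)
    (h : d ≤ (pre.length : Int)) :
    PySem.List.pyGetD (pvWin pre) ((PySem.List.len (pvWin pre)) - d) 0
      = pvG (pre ++ v :: rest) ((pre.length : Int) - d) := by
  rw [pvWin_get pre d h1 hd h, pvG_prefix pre (v :: rest) _ (by omega) (by omega)]

theorem pvStep (pre rest : List Int) (v : Int) (c : Int) :
    pvBodyB (c, pvWin pre) v = (c + pvContrib (pre ++ v :: rest) pre.length, pvWin (pre ++ [v])) := by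
  unfold pvBodyB
  dsimp only
  set k := PySem.List.len (pvWin pre) with hkdef
  have hkk : k = ((pre.length - (pre.length - 4) : Nat) : Int) := by
    rw [hkdef]; unfold pvWin; simp
  set lp := pre.length with hlp
  set Q1 : Prop := nwd (nwd (PySem.List.pyGetD (pvWin pre) (k - 2) 0) (PySem.List.pyGetD (pvWin pre) (k - 1) 0)) v = 1 with hQ1
  set Q2 : Prop := nwd (nwd (PySem.List.pyGetD (pvWin pre) (k - 3) 0) (PySem.List.pyGetD (pvWin pre) (k - 2) 0)) v = 1 with hQ2
  set Q3 : Prop := nwd (nwd (PySem.List.pyGetD (pvWin pre) (k - 3) 0) (PySem.List.pyGetD (pvWin pre) (k - 1) 0)) v = 1 with hQ3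
  set Q4 : Prop := nwd (nwd (PySem.List.pyGetD (pvWin pre) (k - 4) 0) (PySem.List.pyGetD (pvWin pre) (k - 2) 0)) v = 1 with hQ4
  rw [Prod.mk.injEq]
  refine ⟨?_, pvWin_push pre v⟩
  rw [pvIte_succ (2 ≤ k ∧ Q1) c,
      pvIte_two (3 ≤ k) Q2 Q3 (c + pvInd (2 ≤ k ∧ Q1)),
      pvIte_succ (4 ≤ k ∧ Q4) _]
  have e1 : pvInd (2 ≤ (lp : Int) ∧ pvP1 (pre ++ v :: rest) ((lp : Int) - 2)) = pvInd (2 ≤ k ∧ Q1) := by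
    by_cases h2 : (2 : Int) ≤ (lp : Int)
    · have l1 := pvLook pre rest v 2 (by norm_num) (by norm_num) h2
      have l2 := pvLook pre rest v 1 (by norm_num) (by norm_num) (by omega)
      unfold pvInd
      have hiff : (2 ≤ (lp : Int) ∧ pvP1 (pre ++ v :: rest) ((lp : Int) - 2)) ↔ (2 ≤ k ∧ Q1) := by
        apply and_congr (by rw [hkk]; omega)
        unfold pvP1
        rw [hQ1, l1, show ((lp : Int) - 2 + 1) = (lp : Int) - 1 from by ring,
            show ((lp : Int) - 2 + 2) = (lp : Int) from by ring, pvG_at, l2]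
      rw [if_congr hiff rfl rfl]
    · unfold pvInd
      rw [if_neg (fun hc => h2 hc.1), if_neg (fun hc => h2 (by have hh := hc.1; rw [hkk] at hh; omega))]
  have e2 : pvInd (3 ≤ (lp : Int) ∧ pvP2 (pre ++ v :: rest) ((lp : Int) - 3)) = pvInd (3 ≤ k ∧ Q2) := by
    by_cases h2 : (3 : Int) ≤ (lp : Int)
    · have l1 := pvLook pre rest v 3 (by norm_num) (by norm_num) h2
      have l2 := pvLook pre rest v 2 (by norm_num) (by norm_num) (by omega)
      unfold pvInd
      have hiff : (3 ≤ (lp : Int) ∧ pvP2 (pre ++ v :: rest) ((lp : Int) - 3)) ↔ (3 ≤ k ∧ Q2) := by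
        apply and_congr (by rw [hkk]; omega)
        unfold pvP2
        rw [hQ2, l1, show ((lp : Int) - 3 + 1) = (lp : Int) - 2 from by ring,
            show ((lp : Int) - 3 + 3) = (lp : Int) from by ring, pvG_at, l2]
      rw [if_congr hiff rfl rfl]
    · unfold pvInd
      rw [if_neg (fun hc => h2 hc.1), if_neg (fun hc => h2 (by have hh := hc.1; rw [hkk] at hh; omega))]
  have e3 : pvInd (3 ≤ (lp : Int) ∧ pvP3 (pre ++ v :: rest) ((lp : Int) - 3)) = pvInd (3 ≤ k ∧ Q3) := by
    by_cases h2 : (3 : Int) ≤ (lp : Int)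
    · have l1 := pvLook pre rest v 3 (by norm_num) (by norm_num) h2
      have l2 := pvLook pre rest v 1 (by norm_num) (by norm_num) (by omega)
      unfold pvInd
      have hiff : (3 ≤ (lp : Int) ∧ pvP3 (pre ++ v :: rest) ((lp : Int) - 3)) ↔ (3 ≤ k ∧ Q3) := by
        apply and_congr (by rw [hkk]; omega)
        unfold pvP3
        rw [hQ3, l1, show ((lp : Int) - 3 + 2) = (lp : Int) - 1 from by ring,
            show ((lp : Int) - 3 + 3) = (lp : Int) from by ring, pvG_at, l2]
      rw [if_congr hiff rfl rfl]
    · unfold pvInd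
      rw [if_neg (fun hc => h2 hc.1), if_neg (fun hc => h2 (by have hh := hc.1; rw [hkk] at hh; omega))]
  have e4 : pvInd (4 ≤ (lp : Int) ∧ pvP4 (pre ++ v :: rest) ((lp : Int) - 4)) = pvInd (4 ≤ k ∧ Q4) := by
    by_cases h2 : (4 : Int) ≤ (lp : Int)
    · have l1 := pvLook pre rest v 4 (by norm_num) (by norm_num) h2
      have l2 := pvLook pre rest v 2 (by norm_num) (by norm_num) (by omega)
      unfold pvInd
      have hiff : (4 ≤ (lp : Int) ∧ pvP4 (pre ++ v :: rest) ((lp : Int) - 4)) ↔ (4 ≤ k ∧ Q4) := by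
        apply and_congr (by rw [hkk]; omega)
        unfold pvP4
        rw [hQ4, l1, show ((lp : Int) - 4 + 2) = (lp : Int) - 2 from by ring,
            show ((lp : Int) - 4 + 4) = (lp : Int) from by ring, pvG_at, l2]
      rw [if_congr hiff rfl rfl]
    · unfold pvInd
      rw [if_neg (fun hc => h2 hc.1), if_neg (fun hc => h2 (by have hh := hc.1; rw [hkk] at hh; omega))]
  unfold pvContrib
  rw [e1, e2, e3, e4]
  ring

theorem pvRun (suf : List Int) : ∀ (pre : List Int) (c : Int),
    (suf.foldl pvBodyB (c, pvWin pre)).1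
      = c + ((List.range suf.length).map (fun t => pvContrib (pre ++ suf) (pre.length + t))).sum := by
  induction suf with
  | nil => intro pre c; simp
  | cons v rest ih =>
    intro pre c
    rw [List.foldl_cons, pvStep pre rest v c, ih (pre ++ [v])]
    rw [show pre ++ [v] ++ rest = pre ++ v :: rest from by simp,
        show (pre ++ [v]).length = pre.length + 1 from by simp]
    rw [List.length_cons, List.range_succ_eq_map, List.map_cons, List.sum_cons, List.map_map]
    have hfun : ((fun t => pvContrib (pre ++ v :: rest) (pre.length + t)) ∘ Nat.succ)
        = fun t => pvContrib (pre ++ v :: rest) (pre.length + 1 + t) := by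
      funext t
      simp only [Function.comp_apply]
      congr 1
      omega
    rw [hfun]
    have hz : pre.length + 0 = pre.length := by omega
    rw [hz]
    ring


-- shift: the guarded end-anchored sum over range N equals the plain sum over range (N - k)
theorem pvShift (P : Int → Prop) [DecidablePred P] (k : Nat) : ∀ (N : Nat),
    ((List.range N).map (fun (j : Nat) => pvInd ((k : Int) ≤ (j : Int) ∧ P ((j : Int) - (k : Int))))).sum
      = ((List.range (N - k)).map (fun (t : Nat) => pvInd (P (t : Int)))).sum := by
  intro N
  induction N with
  | zero => simp
  | succ N ih =>
    rw [List.range_succ, List.map_append, List.sum_append, ih]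
    by_cases h : k ≤ N
    · rw [show N + 1 - k = (N - k) + 1 by omega, List.range_succ, List.map_append, List.sum_append]
      congr 1
      simp only [List.map_cons, List.map_nil, List.sum_cons, List.sum_nil]
      rw [show ((N : Int) - (k : Int)) = (((N - k : Nat)) : Int) by omega]
      unfold pvInd
      by_cases hp : P (((N - k : Nat)) : Int)
      · rw [if_pos ⟨by exact_mod_cast h, hp⟩, if_pos hp]
      · rw [if_neg (fun hc => hp hc.2), if_neg hp]
    · rw [show N + 1 - k = N - k by omega]
      simp only [List.map_cons, List.map_nil, List.sum_cons, List.sum_nil]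
      unfold pvInd
      rw [if_neg (by rintro ⟨h1, -⟩; omega)]
      ring

-- ===== VERDICT (by name: the statement is the Claim_ definition above) =====
theorem trojki_spec : Claim_equal_trojki := by
  intro tab _
  unfold Spec_trojki
  have hB : trojki_alt tab
      = ((List.range (tab.length - 2)).map (fun (t : Nat) => pvInd (pvP1 tab (t : Int)))).sum
        + ((List.range (tab.length - 3)).map (fun (t : Nat) => pvInd (pvP2 tab (t : Int)))).sum
        + ((List.range (tab.length - 3)).map (fun (t : Nat) => pvInd (pvP3 tab (t : Int)))).sum
        + ((List.range (tab.length - 4)).map (fun (t : Nat) => pvInd (pvP4 tab (t : Int)))).sum := by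
    rw [trojki_alt_eq]
    have hr := pvRun tab [] 0
    rw [show pvWin [] = ([] : List Int) from rfl] at hr
    simp only [List.nil_append, List.length_nil, zero_add] at hr
    rw [hr]
    unfold pvContrib
    rw [PySem.List.sum_map_add_int, PySem.List.sum_map_add_int, PySem.List.sum_map_add_int]
    have s1 := pvShift (fun i => pvP1 tab i) 2 tab.length
    have s2 := pvShift (fun i => pvP2 tab i) 3 tab.length
    have s3 := pvShift (fun i => pvP3 tab i) 3 tab.length
    have s4 := pvShift (fun i => pvP4 tab i) 4 tab.length
    push_cast at s1 s2 s3 s4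
    rw [s1, s2, s3, s4]
  rw [hB]
  unfold trojki
  dsimp only
  rw [pvFoldl_ind (fun i => pvP1 tab i),
      pvFoldl_ind2 (fun i => pvP2 tab i) (fun i => pvP3 tab i),
      pvFoldl_ind (fun i => pvP4 tab i)]
  simp only [PySem.List.len_eq]
  rw [pvRangeConv (fun i => pvP1 tab i), pvRangeConv (fun i => pvP2 tab i),
      pvRangeConv (fun i => pvP3 tab i), pvRangeConv (fun i => pvP4 tab i)]
  rw [show ((tab.length : Int) - 2).toNat = tab.length - 2 from by omega,
      show ((tab.length : Int) - 3).toNat = tab.length - 3 from by omega,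
      show ((tab.length : Int) - 4).toNat = tab.length - 4 from by omega]
  ring
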